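-- pv_equiv track=rewrite | github.com/bong-water-water-bong/meek | reflex/shadow.py | _severity_for
-- ===== SOURCE A (Python) =====
-- _SEVERITY_RULES: list[tuple[str, str]] = [
--     ("/etc/systemd/system/",                    "CRITICAL"),
--     ("/etc/ssh/",                               "CRITICAL"),
--     ("/etc/nftables.conf",                      "HIGH"),
--     ("/etc/wireguard/",                         "HIGH"),
--     ("/etc/fail2ban/",                          "HIGH"),
--     ("/srv/ai/configs/",                        "MEDIUM"),
--     ("/srv/ai/scripts/",                        "MEDIUM"),
-- ]
--
-- def _severity_for(path: str) -> str:
--     """Determine severity based on file path."""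
--     best = "MEDIUM"
--     best_len = 0
--     for prefix, sev in _SEVERITY_RULES:
--         if path.startswith(prefix) and len(prefix) > best_len:
--             best = sev
--             best_len = len(prefix)
--     return best
-- ===== SOURCE B (Python) =====
-- _SEVERITY_RULES: list[tuple[str, str]] = [
--     ("/etc/systemd/system/",                    "CRITICAL"),
--     ("/etc/ssh/",                               "CRITICAL"),
--     ("/etc/nftables.conf",                      "HIGH"),
--     ("/etc/wireguard/",                         "HIGH"),
--     ("/etc/fail2ban/",                          "HIGH"),
--     ("/srv/ai/configs/",                        "MEDIUM"),
--     ("/srv/ai/scripts/",                        "MEDIUM"),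
-- ]
--
-- def _severity_for(path: str) -> str:
--     """Determine severity based on file path: longest matching prefix wins."""
--     for prefix, sev in sorted(_SEVERITY_RULES, key=lambda r: -len(r[0])):
--         if path.startswith(prefix):
--             return sev
--     return "MEDIUM"
-- ===== Notes on version B (the rewrite author's own statement) =====
-- stated objective: idiomatic
-- what changed: B pre-sorts the rules by descending prefix length (stable) and returns the severity of the first matching prefix, instead of A's scan-all loop that tracks the best match and its length.
import Mathlib
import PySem

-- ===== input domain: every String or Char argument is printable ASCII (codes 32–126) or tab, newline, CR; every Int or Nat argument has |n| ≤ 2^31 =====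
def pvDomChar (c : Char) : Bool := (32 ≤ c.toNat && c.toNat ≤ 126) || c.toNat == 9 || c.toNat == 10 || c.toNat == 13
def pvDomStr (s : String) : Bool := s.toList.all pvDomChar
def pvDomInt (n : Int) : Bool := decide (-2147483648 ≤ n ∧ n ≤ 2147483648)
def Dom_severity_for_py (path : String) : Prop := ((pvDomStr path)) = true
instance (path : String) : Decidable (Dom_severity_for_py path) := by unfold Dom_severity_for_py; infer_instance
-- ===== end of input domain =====

-- B replaces A's scan-all-rules-tracking-best loop with a stable descending sort by prefix
-- length followed by a first-match early return (objective: idiomatic; return value only).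

def severityRules : List (String × String) :=
  [ ("/etc/systemd/system/", "CRITICAL"),
    ("/etc/ssh/",            "CRITICAL"),
    ("/etc/nftables.conf",   "HIGH"),
    ("/etc/wireguard/",      "HIGH"),
    ("/etc/fail2ban/",       "HIGH"),
    ("/srv/ai/configs/",     "MEDIUM"),
    ("/srv/ai/scripts/",     "MEDIUM") ]

-- ===== PORT A =====
-- fold over the rules carrying (best, best_len), exactly A's loop
def severity_for_py (path : String) : String :=
  (severityRules.foldl
    (fun (st : String × Int) r =>
      if PySem.Str.startswith path r.1 ∧ (PySem.Str.len r.1 : Int) > st.2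
      then (r.2, (PySem.Str.len r.1 : Int))
      else st)
    ("MEDIUM", 0)).1

-- ===== PORT B =====
-- first-match scan of the sorted rule list, B's early-return loop
def firstMatch (path : String) : List (String × String) → String
  | [] => "MEDIUM"
  | r :: rest => if PySem.Str.startswith path r.1 then r.2 else firstMatch path rest

def severity_for_py_alt (path : String) : String :=
  firstMatch path (PySem.List.sorted severityRules (fun r => -(PySem.Str.len r.1 : Int)) false)

-- ===== PRECONDITION & SPEC =====
def Spec_severity_for_py (path : String) (out : String) : Prop := out = severity_for_py_alt path
instance (path : String) (out : String) : Decidable (Spec_severity_for_py path out) := by unfold Spec_severity_for_py; infer_instance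

-- ===== CLAIM (what is proved, stated in full; the proofs are below) =====
def Claim_equal_severity_for_py : Prop := ∀ (path : String), Dom_severity_for_py path → Spec_severity_for_py path (severity_for_py path)

-- ===== LEMMAS AND PROOFS =====

-- the concrete result of B's sort (stable, descending prefix length)
lemma sorted_rules_eq :
    PySem.List.sorted severityRules (fun r => -(PySem.Str.len r.1 : Int)) false =
    [ ("/etc/systemd/system/", "CRITICAL"),
      ("/etc/nftables.conf",   "HIGH"),
      ("/srv/ai/configs/",     "MEDIUM"),
      ("/srv/ai/scripts/",     "MEDIUM"),
      ("/etc/wireguard/",      "HIGH"),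
      ("/etc/fail2ban/",       "HIGH"),
      ("/etc/ssh/",            "CRITICAL") ] := by
  set_option maxHeartbeats 2000000 in
  decide

-- ===== VERDICT (by name: the statement is the Claim_ definition above) =====
set_option maxHeartbeats 4000000 in
theorem severity_for_py_spec : Claim_equal_severity_for_py := by
  intro path _
  unfold Spec_severity_for_py severity_for_py severity_for_py_alt
  rw [sorted_rules_eq]
  by_cases h1 : PySem.Chars.startswith path.toList "/etc/systemd/system/".toList = true <;>
  by_cases h2 : PySem.Chars.startswith path.toList "/etc/ssh/".toList = true <;>
  by_cases h3 : PySem.Chars.startswith path.toList "/etc/nftables.conf".toList = true <;>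
  by_cases h4 : PySem.Chars.startswith path.toList "/etc/wireguard/".toList = true <;>
  by_cases h5 : PySem.Chars.startswith path.toList "/etc/fail2ban/".toList = true <;>
  by_cases h6 : PySem.Chars.startswith path.toList "/srv/ai/configs/".toList = true <;>
  by_cases h7 : PySem.Chars.startswith path.toList "/srv/ai/scripts/".toList = true <;>
  simp at h1 h2 h3 h4 h5 h6 h7 <;>
  simp [severityRules, firstMatch, PySem.Str.len, h1, h2, h3, h4, h5, h6, h7,
    (show "/etc/systemd/system/".length = 20 by decide),
    (show "/etc/ssh/".length = 9 by decide),
    (show "/etc/nftables.conf".length = 18 by decide),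
    (show "/etc/wireguard/".length = 15 by decide),
    (show "/etc/fail2ban/".length = 14 by decide),
    (show "/srv/ai/configs/".length = 16 by decide),
    (show "/srv/ai/scripts/".length = 16 by decide)]
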